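-- pv_equiv track=rewrite | github.com/amaslyaev/noorm | noorm/_sqlite_common.py | _propagate_positional_params
-- ===== SOURCE A (Python) =====
-- def _propagate_positional_params(
--     list_param_sizes: dict[int, int], next_idx_var: list[int], code: str
-- ) -> str:
--     split_code = code.split("?")
--     code_parts: list[str] = []
--     for qmark_idx in range(len(split_code) - 1):
--         code_parts.append(split_code[qmark_idx])
--         if next_idx_var[0] in list_param_sizes:
--             code_parts.append(
--                 ", ".join("?" for _ in range(list_param_sizes[next_idx_var[0]]))
--             )
--         else:
--             code_parts.append("?")
--         next_idx_var[0] += 1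
--     return "".join(code_parts) + split_code[-1]
-- ===== SOURCE B (Python) =====
-- def _propagate_positional_params(
--     list_param_sizes: dict[int, int], next_idx_var: list[int], code: str
-- ) -> str:
--     # Single left-to-right scan over the characters: each "?" is expanded on
--     # the spot (no split / segment indexing / rebuild).
--     out: list[str] = []
--     for ch in code:
--         if ch == "?":
--             n = next_idx_var[0]
--             next_idx_var[0] = n + 1
--             out.append(", ".join("?" * list_param_sizes[n]) if n in list_param_sizes else "?")
--         else:
--             out.append(ch)
--     return "".join(out)
-- ===== Notes on version B (the rewrite author's own statement) =====
-- stated objective: simpler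
-- what changed: B replaces A's split-on-'?' / index-over-segments / rebuild-and-rejoin scheme by a single left-to-right character scan that expands each '?' in place (same in-place increments of next_idx_var[0]).
import Mathlib
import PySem

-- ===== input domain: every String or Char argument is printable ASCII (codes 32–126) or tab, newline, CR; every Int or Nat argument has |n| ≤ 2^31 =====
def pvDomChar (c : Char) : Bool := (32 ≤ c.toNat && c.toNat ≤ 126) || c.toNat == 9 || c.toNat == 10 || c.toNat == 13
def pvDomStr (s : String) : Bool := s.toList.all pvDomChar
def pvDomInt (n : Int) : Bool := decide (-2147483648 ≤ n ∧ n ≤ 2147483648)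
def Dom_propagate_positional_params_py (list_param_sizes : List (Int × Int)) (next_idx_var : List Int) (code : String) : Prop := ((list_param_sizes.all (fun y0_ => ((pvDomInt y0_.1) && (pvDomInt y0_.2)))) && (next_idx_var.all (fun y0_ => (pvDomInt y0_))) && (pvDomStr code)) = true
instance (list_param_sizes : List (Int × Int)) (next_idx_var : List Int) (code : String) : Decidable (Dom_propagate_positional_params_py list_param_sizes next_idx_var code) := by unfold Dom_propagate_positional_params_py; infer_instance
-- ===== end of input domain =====

-- B replaces A's split-on-'?' / index-segments / rejoin scheme by one left-to-right character
-- scan expanding each '?' in place; return values proved equal on Pre_ (both Pythons raise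
-- IndexError outside it); both Pythons mutate next_idx_var[0] identically (not modelled here).

-- ===== PORT A =====
-- ", ".join("?" for _ in range(sz))
def pvJoinMarksA (sz : Int) : String :=
  PySem.Str.join ", " ((PySem.List.pyRange 0 sz 1).map (fun _ => "?"))

-- A's loop body: append split_code[qmark_idx] (passed as `seg`); append the expansion or "?";
-- next_idx_var[0] += 1 (st.2 threads the mutable cell next_idx_var[0])
def pvStepCoreA (list_param_sizes : List (Int × Int)) (st : List String × Int) (seg : String) : List String × Int :=
  let parts := st.1 ++ [seg]
  let parts :=
    match list_param_sizes.lookup st.2 with  -- `in` test + `[...]` on the dict (assoc list, first match)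
    | some sz => parts ++ [pvJoinMarksA sz]
    | none => parts ++ ["?"]
  (parts, st.2 + 1)

def propagate_positional_params_py (list_param_sizes : List (Int × Int)) (next_idx_var : List Int) (code : String) : String :=
  let split_code : List String := (PySem.Str.split? code "?").getD []  -- sep "?" ≠ "" so split? = some …
  -- next_idx_var[0], read once and threaded through the loop; Pre_ makes the read valid whenever the loop runs
  let n0 : Int := PySem.List.pyGetD next_idx_var 0 0
  let r := (PySem.List.pyRange 0 ((split_code.length : Int) - 1) 1).foldl
      (fun st qmark_idx => pvStepCoreA list_param_sizes st (PySem.List.pyGetD split_code qmark_idx ""))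
      ([], n0)
  PySem.Str.join "" r.1 ++ PySem.List.pyGetD split_code (-1) ""

-- ===== PORT B =====
-- ", ".join("?" * sz) if n in list_param_sizes else "?"
def pvExpandB (list_param_sizes : List (Int × Int)) (n : Int) : String :=
  match list_param_sizes.lookup n with
  | some sz => PySem.Str.join ", " ((List.replicate sz.toNat '?').map (fun c => String.ofList [c]))
  | none => "?"

-- B's `for ch in code:` loop building `out`; the Int threads next_idx_var[0]
def pvAltGo (list_param_sizes : List (Int × Int)) : List Char → Int → List String
  | [], _ => []
  | c :: rest, n =>
    if c = '?' then pvExpandB list_param_sizes n :: pvAltGo list_param_sizes rest (n + 1)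
    else String.ofList [c] :: pvAltGo list_param_sizes rest n

def propagate_positional_params_py_alt (list_param_sizes : List (Int × Int)) (next_idx_var : List Int) (code : String) : String :=
  PySem.Str.join "" (pvAltGo list_param_sizes code.toList (PySem.List.pyGetD next_idx_var 0 0))

-- ===== PRECONDITION & SPEC =====
-- Pre_ excludes exactly the inputs where the Python A raises IndexError: a '?' in `code` with
-- `next_idx_var` empty (B raises the same IndexError there).
def Pre_propagate_positional_params_py (list_param_sizes : List (Int × Int)) (next_idx_var : List Int) (code : String) : Prop :=
  PySem.Str.isIn "?" code = true → next_idx_var ≠ []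
instance (list_param_sizes : List (Int × Int)) (next_idx_var : List Int) (code : String) : Decidable (Pre_propagate_positional_params_py list_param_sizes next_idx_var code) := by unfold Pre_propagate_positional_params_py; infer_instance

def pvWitness_propagate_positional_params_py : (List (Int × Int)) × List Int × String := ([(0, 3)], [0], "SELECT * FROM t WHERE a = ? AND b = ?")

def Spec_propagate_positional_params_py (list_param_sizes : List (Int × Int)) (next_idx_var : List Int) (code : String) (out : String) : Prop := out = propagate_positional_params_py_alt list_param_sizes next_idx_var code
instance (list_param_sizes : List (Int × Int)) (next_idx_var : List Int) (code : String) (out : String) : Decidable (Spec_propagate_positional_params_py list_param_sizes next_idx_var code out) := by unfold Spec_propagate_positional_params_py; infer_instance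

-- ===== CLAIM (what is proved, stated in full; the proofs are below) =====
def Claim_equal_propagate_positional_params_py : Prop := ∀ (list_param_sizes : List (Int × Int)) (next_idx_var : List Int) (code : String), Dom_propagate_positional_params_py list_param_sizes next_idx_var code → Pre_propagate_positional_params_py list_param_sizes next_idx_var code → Spec_propagate_positional_params_py list_param_sizes next_idx_var code (propagate_positional_params_py list_param_sizes next_idx_var code)

-- ===== LEMMAS AND PROOFS =====

-- expansion of one '?', at char level (common value of pvJoinMarksA / pvExpandB)
def pvE (list_param_sizes : List (Int × Int)) (n : Int) : List Char :=
  match list_param_sizes.lookup n with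
  | some sz => List.intercalate [',', ' '] (List.replicate sz.toNat ['?'])
  | none => ['?']

-- the canonical character scan both ports compute
def pvScan (list_param_sizes : List (Int × Int)) : List Char → Int → List Char
  | [], _ => []
  | c :: rest, n =>
    if c = '?' then pvE list_param_sizes n ++ pvScan list_param_sizes rest (n + 1)
    else c :: pvScan list_param_sizes rest n

-- structural split on '?', with the pending segment as accumulator
def pvSplitQ (pre : List Char) : List Char → List (List Char)
  | [] => [pre]
  | c :: rest => if c = '?' then pre :: pvSplitQ [] rest else pvSplitQ (pre ++ [c]) rest

-- A's reassembly of a split list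
def pvR (list_param_sizes : List (Int × Int)) : List (List Char) → Int → List Char
  | [], _ => []
  | [s], _ => s
  | s :: t :: ss, n => s ++ pvE list_param_sizes n ++ pvR list_param_sizes (t :: ss) (n + 1)

-- contribution of A's loop (over the dropLast of the split)
def pvRun (list_param_sizes : List (Int × Int)) : List (List Char) → Int → List Char
  | [], _ => []
  | s :: ss, n => s ++ pvE list_param_sizes n ++ pvRun list_param_sizes ss (n + 1)

theorem pvJoin_nil (xss : List (List Char)) : PySem.Chars.join [] xss = xss.flatten := by
  induction xss with
  | nil => rfl
  | cons x t ih =>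
    cases t with
    | nil => simp [PySem.Chars.join, List.intercalate]
    | cons y t' =>
      simp [PySem.Chars.join, List.intercalate, List.intersperse] at ih ⊢
      exact ih

theorem pvJoinToList (xs : List String) :
    (PySem.Str.join "" xs).toList = (xs.map String.toList).flatten := by
  rw [PySem.Str.toList_join]
  have h : ("" : String).toList = [] := rfl
  rw [h, pvJoin_nil]

theorem pvToList_joinMarksA (sz : Int) :
    (pvJoinMarksA sz).toList = List.intercalate [',', ' '] (List.replicate sz.toNat ['?']) := by
  rw [pvJoinMarksA, PySem.Str.toList_join]
  simp [List.map_const', PySem.List.length_pyRange_one, PySem.Chars.join]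

theorem pvToList_expandB (lps : List (Int × Int)) (n : Int) :
    (pvExpandB lps n).toList = pvE lps n := by
  unfold pvExpandB pvE
  cases h : lps.lookup n with
  | none => rfl
  | some sz =>
    rw [PySem.Str.toList_join]
    simp [List.map_map, List.map_replicate, PySem.Chars.join]

theorem pvB_scan (lps : List (Int × Int)) (l : List Char) :
    ∀ (n : Int), (PySem.Str.join "" (pvAltGo lps l n)).toList = pvScan lps l n := by
  induction l with
  | nil => intro n; simp [pvAltGo, pvScan]
  | cons c rest ih =>
    intro n
    by_cases hc : c = '?' <;>
      simp [pvAltGo, pvScan, hc, pvToList_expandB, ← ih, pvJoin_nil]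

theorem pvGo_eq (l : List Char) :
    ∀ (fuel : Nat) (cur : List Char) (acc : List (List Char)), l.length ≤ fuel →
      PySem.Chars.splitOn.go ['?'] fuel l cur acc = acc.reverse ++ pvSplitQ cur.reverse l := by
  induction l with
  | nil =>
    intro fuel cur acc _
    cases fuel <;> simp [PySem.Chars.splitOn.go, pvSplitQ]
  | cons c rest ih =>
    intro fuel cur acc hle
    cases fuel with
    | zero => simp at hle
    | succ f =>
      by_cases hc : c = '?'
      · subst hc
        have hpre : List.isPrefixOf ['?'] ('?' :: rest) = true := by simp [List.isPrefixOf]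
        simp only [PySem.Chars.splitOn.go, hpre, if_pos]
        have hdrop : List.drop ['?'].length ('?' :: rest) = rest := rfl
        rw [hdrop, ih f [] (cur.reverse :: acc) (by simpa using hle)]
        simp [pvSplitQ]
      · have hpre : List.isPrefixOf ['?'] (c :: rest) = false := by
          simp [List.isPrefixOf]; exact fun h => absurd h.symm hc
        simp only [PySem.Chars.splitOn.go, hpre]
        rw [ih f (c :: cur) acc (by simpa using hle)]
        simp [pvSplitQ, hc]

theorem pvSplitOn_eq (l : List Char) : PySem.Chars.splitOn l ['?'] = pvSplitQ [] l := by
  rw [PySem.Chars.splitOn, pvGo_eq l (l.length + 1) [] [] (by omega)]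
  simp

theorem pvSplitQ_ne_nil (pre : List Char) (l : List Char) : pvSplitQ pre l ≠ [] := by
  induction l generalizing pre with
  | nil => simp [pvSplitQ]
  | cons c rest ih => by_cases hc : c = '?' <;> simp [pvSplitQ, hc, ih]

theorem pvR_splitQ (lps : List (Int × Int)) (l : List Char) :
    ∀ (pre : List Char) (n : Int), pvR lps (pvSplitQ pre l) n = pre ++ pvScan lps l n := by
  induction l with
  | nil => intro pre n; simp [pvSplitQ, pvR, pvScan]
  | cons c rest ih =>
    intro pre n
    by_cases hc : c = '?'
    · subst hc
      obtain ⟨t, ts, hts⟩ := List.exists_cons_of_ne_nil (pvSplitQ_ne_nil [] rest)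
      simp only [pvSplitQ, if_pos]
      rw [hts]
      simp only [pvR]
      rw [← hts, ih [] (n + 1)]
      simp [pvScan]
    · simp only [pvSplitQ, if_neg hc]
      rw [ih (pre ++ [c]) n]
      simp [pvScan, hc]

theorem pvFold (lps : List (Int × Int)) (ts : List String) :
    ∀ (parts : List String) (n : Int),
      (((ts.foldl (pvStepCoreA lps) (parts, n)).1).map String.toList).flatten =
        ((parts.map String.toList).flatten) ++ pvRun lps (ts.map String.toList) n := by
  induction ts with
  | nil => intro parts n; simp [pvRun]
  | cons t ts ih =>
    intro parts n
    rw [List.foldl_cons]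
    cases h : lps.lookup n with
    | some sz =>
      have hstep : pvStepCoreA lps (parts, n) t = (parts ++ [t] ++ [pvJoinMarksA sz], n + 1) := by
        simp [pvStepCoreA, h]
      rw [hstep, ih]
      simp [pvRun, pvE, h, pvToList_joinMarksA]
    | none =>
      have hstep : pvStepCoreA lps (parts, n) t = (parts ++ [t] ++ ["?"], n + 1) := by
        simp [pvStepCoreA, h]
      rw [hstep, ih]
      simp [pvRun, pvE, h]

theorem pvRun_getLast (lps : List (Int × Int)) (ss : List (List Char)) :
    ∀ (h : ss ≠ []) (n : Int), pvRun lps ss.dropLast n ++ ss.getLast h = pvR lps ss n := by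
  induction ss with
  | nil => intro h; exact absurd rfl h
  | cons s ss ih =>
    intro h n
    cases ss with
    | nil => simp [pvRun, pvR]
    | cons t ts =>
      rw [List.dropLast_cons₂]
      simp only [pvRun, pvR]
      rw [List.getLast_cons (List.cons_ne_nil t ts), List.append_assoc, List.append_assoc,
        ih (List.cons_ne_nil t ts) (n + 1)]
      simp

theorem pvGetD_neg_one {α : Type} (xs : List α) (h : xs ≠ []) (d : α) :
    PySem.List.pyGetD xs (-1) d = xs.getLast h := by
  have hlen : 1 ≤ xs.length := List.length_pos_of_ne_nil h
  simp only [PySem.List.pyGetD, PySem.List.pyGet?, PySem.List.pyIdx?]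
  rw [if_neg (by omega), if_pos (by omega : -(xs.length : Int) ≤ -1)]
  simp only [Option.bind_some]
  rw [List.getLast_eq_getElem]
  rw [List.getElem?_eq_getElem (by omega)]
  simp

theorem pvA_scan (lps : List (Int × Int)) (niv : List Int) (code : String) :
    (propagate_positional_params_py lps niv code).toList =
      pvScan lps code.toList (PySem.List.pyGetD niv 0 0) := by
  have hsplit : (PySem.Str.split? code "?").getD [] =
      (pvSplitQ [] code.toList).map String.ofList := by
    rw [PySem.Str.split?, PySem.Chars.split?]
    simp [pvSplitOn_eq]
  set n0 : Int := PySem.List.pyGetD niv 0 0 with hn0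
  set ss : List (List Char) := pvSplitQ [] code.toList with hss
  have hne : ss ≠ [] := pvSplitQ_ne_nil [] code.toList
  have hslne : ss.map String.ofList ≠ [] := by simpa using hne
  have hlen1 : 1 ≤ (ss.map String.ofList).length := List.length_pos_of_ne_nil hslne
  have hd : (ss.map String.ofList).dropLast.length = (ss.map String.ofList).length - 1 :=
    List.length_dropLast
  rw [propagate_positional_params_py]
  simp only [hsplit, ← hn0, ← hss]
  have hb : (((ss.map String.ofList).length : Int) - 1) =
      (((ss.map String.ofList).dropLast.length : Nat) : Int) := by omega
  rw [hb]
  have hcongr : (PySem.List.pyRange 0 (((ss.map String.ofList).dropLast.length : Nat) : Int) 1).foldl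
      (fun st qmark_idx => pvStepCoreA lps st (PySem.List.pyGetD (ss.map String.ofList) qmark_idx ""))
      ([], n0) =
      (PySem.List.pyRange 0 (((ss.map String.ofList).dropLast.length : Nat) : Int) 1).foldl
      (fun st qmark_idx => pvStepCoreA lps st (PySem.List.pyGetD (ss.map String.ofList).dropLast qmark_idx ""))
      ([], n0) := by
    apply PySem.List.foldl_congr_mem
    intro acc j hj
    rw [PySem.List.mem_pyRange_one] at hj
    have hj2 : j < (((ss.map String.ofList).dropLast.length : Nat) : Int) := hj.2
    rw [PySem.List.pyGetD_eq_getElem (ss.map String.ofList) "" hj.1 (by omega),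
        PySem.List.pyGetD_eq_getElem (ss.map String.ofList).dropLast "" hj.1 (by omega),
        List.getElem_dropLast]
  rw [hcongr,
    PySem.List.foldl_pyRange_pyGetD' (ss.map String.ofList).dropLast "" (pvStepCoreA lps) ([], n0) (le_refl 0)]
  simp only [Int.toNat_zero, List.drop_zero]
  rw [pvGetD_neg_one (ss.map String.ofList) hslne ""]
  rw [String.toList_append, pvJoinToList, pvFold]
  have hdl : (ss.map String.ofList).dropLast.map String.toList = ss.dropLast := by
    rw [← List.map_dropLast, List.map_map]
    simp [Function.comp_def]
  have hgl : ((ss.map String.ofList).getLast hslne).toList = ss.getLast hne := by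
    rw [List.getLast_map]
    simp
  rw [hdl, hgl]
  simp only [List.map_nil, List.flatten_nil, List.nil_append]
  rw [pvRun_getLast lps ss hne n0, hss, pvR_splitQ lps code.toList [] n0]
  simp

-- ===== VERDICT (by name: the statement is the Claim_ definition above) =====
theorem propagate_positional_params_py_spec : Claim_equal_propagate_positional_params_py := by
  intro lps niv code _ _
  unfold Spec_propagate_positional_params_py
  apply String.toList_inj.mp
  rw [pvA_scan, propagate_positional_params_py_alt, pvB_scan]
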